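-- pv_equiv track=rewrite | github.com/johanvax/minesweeper | game.py | _get_neighbour_coords
-- ===== SOURCE A (Python) =====
-- def _get_neighbour_coords(grid, r, c):
--     rows = len(grid)
--     cols = len(grid[0]) if rows > 0 else 0
--     neighbor_coords = []
--     offsets = [(-1, -1), (-1, 0), (-1, 1), (0, -1), (0, 1), (1, -1), (1, 0), (1, 1)]
--     for dr, dc in offsets:
--         nr, nc = r + dr, c + dc
--         if 0 <= nr < rows and 0 <= nc < cols:
--             neighbor_coords.append((nr, nc))
--     return neighbor_coords
-- ===== SOURCE B (Python) =====
-- def _get_neighbour_coords(grid, r, c):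
--     rows = len(grid)
--     cols = len(grid[0]) if rows > 0 else 0
--     return [(nr, nc)
--             for nr in range(rows)
--             for nc in range(cols)
--             if max(abs(nr - r), abs(nc - c)) == 1]
-- ===== Notes on version B (the rewrite author's own statement) =====
-- stated objective: alternative
-- what changed: B scans every cell index of the grid and keeps those at Chebyshev distance exactly 1 from (r, c), instead of A's adding 8 fixed offsets and bounds-checking each; it trades A's O(1) offset filtering for a full-grid scan with a distance predicate.
import Mathlib
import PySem

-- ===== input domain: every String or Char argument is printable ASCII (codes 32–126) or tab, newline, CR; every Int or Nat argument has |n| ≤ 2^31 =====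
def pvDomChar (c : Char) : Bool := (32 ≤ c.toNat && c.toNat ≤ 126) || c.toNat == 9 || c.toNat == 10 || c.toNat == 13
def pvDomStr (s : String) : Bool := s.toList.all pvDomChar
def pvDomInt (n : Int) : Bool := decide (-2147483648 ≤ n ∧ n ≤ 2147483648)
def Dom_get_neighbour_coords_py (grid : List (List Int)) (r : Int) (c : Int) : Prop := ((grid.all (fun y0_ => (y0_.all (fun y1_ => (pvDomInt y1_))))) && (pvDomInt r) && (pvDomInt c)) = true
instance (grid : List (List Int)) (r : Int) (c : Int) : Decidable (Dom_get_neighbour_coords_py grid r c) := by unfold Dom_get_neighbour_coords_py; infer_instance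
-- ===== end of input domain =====

-- B scans every cell index of the grid and keeps those at Chebyshev distance exactly 1 from (r, c),
-- instead of A's adding 8 fixed offsets with a bounds check; a different (not faster) algorithm.

-- ===== PORT A =====
def get_neighbour_coords_py (grid : List (List Int)) (r : Int) (c : Int) : List (Int × Int) :=
  let rows : Int := grid.length
  let cols : Int := if rows > 0 then ((grid.head?.getD []).length : Int) else 0
  let offsets : List (Int × Int) := [(-1,-1),(-1,0),(-1,1),(0,-1),(0,1),(1,-1),(1,0),(1,1)]
  offsets.foldl (fun acc p =>
    let nr := r + p.1
    let nc := c + p.2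
    if (0 ≤ nr ∧ nr < rows) ∧ (0 ≤ nc ∧ nc < cols) then acc ++ [(nr, nc)] else acc) []

-- ===== PORT B =====
def get_neighbour_coords_py_alt (grid : List (List Int)) (r : Int) (c : Int) : List (Int × Int) :=
  let rows : Int := grid.length
  let cols : Int := if rows > 0 then ((grid.head?.getD []).length : Int) else 0
  (PySem.List.pyRange 0 rows 1).foldl (fun acc nr =>
    (PySem.List.pyRange 0 cols 1).foldl (fun acc2 nc =>
      if max (nr - r).natAbs (nc - c).natAbs = 1 then acc2 ++ [(nr, nc)] else acc2) acc) []

-- ===== PRECONDITION & SPEC =====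
def Spec_get_neighbour_coords_py (grid : List (List Int)) (r : Int) (c : Int) (out : List (Int × Int)) : Prop := out = get_neighbour_coords_py_alt grid r c
instance (grid : List (List Int)) (r : Int) (c : Int) (out : List (Int × Int)) : Decidable (Spec_get_neighbour_coords_py grid r c out) := by unfold Spec_get_neighbour_coords_py; infer_instance

-- ===== CLAIM =====
def Claim_equal_get_neighbour_coords_py : Prop := ∀ (grid : List (List Int)) (r : Int) (c : Int), Dom_get_neighbour_coords_py grid r c → Spec_get_neighbour_coords_py grid r c (get_neighbour_coords_py grid r c)

-- ===== LEMMAS AND PROOFS =====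

-- flatMap over range(0, n) where f produces [] except possibly at a, a+1, a+2
set_option maxHeartbeats 1000000 in
theorem flat_three_nat {β : Type} (k : Nat) (a : Int) (g : Int → List β)
    (h : ∀ x, g x ≠ [] → x = a ∨ x = a + 1 ∨ x = a + 2) :
    (PySem.List.pyRange 0 (k : Int) 1).flatMap g =
      (if 0 ≤ a ∧ a < (k : Int) then g a else []) ++
      (if 0 ≤ a + 1 ∧ a + 1 < (k : Int) then g (a + 1) else []) ++
      (if 0 ≤ a + 2 ∧ a + 2 < (k : Int) then g (a + 2) else []) := by
  induction k with
  | zero =>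
    rw [PySem.List.pyRange_one_eq_nil (by omega)]
    rw [if_neg (by omega), if_neg (by omega), if_neg (by omega)]
    simp
  | succ m ih =>
    have hc : ((m + 1 : Nat) : Int) = (m : Int) + 1 := by push_cast; ring
    rw [hc, PySem.List.pyRange_one_succ_right (by omega), List.flatMap_append, ih]
    have hone : ([( m : Int)].flatMap g) = g (m : Int) := by simp
    rw [hone]
    clear ih
    by_cases h1 : (m : Int) = a
    · subst h1
      clear h
      rw [if_neg (by omega), if_neg (by omega), if_neg (by omega),
          if_pos (by constructor <;> omega), if_neg (by omega), if_neg (by omega)]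
      simp
    · by_cases h2 : (m : Int) = a + 1
      · clear h
        by_cases ha : 0 ≤ a
        · rw [if_pos (by omega), if_neg (by omega), if_neg (by omega),
              if_pos (by omega), if_pos (by omega), if_neg (by omega)]
          rw [← h2]; simp
        · rw [if_neg (by omega), if_neg (by omega), if_neg (by omega),
              if_neg (by omega), if_pos (by omega), if_neg (by omega)]
          rw [← h2]; simp
      · by_cases h3 : (m : Int) = a + 2
        · clear h
          by_cases ha : 0 ≤ a
          · rw [if_pos (by omega), if_pos (by omega), if_neg (by omega),
                if_pos (by omega), if_pos (by omega), if_pos (by omega)]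
            rw [← h3]; simp
          · by_cases ha1 : 0 ≤ a + 1
            · rw [if_neg (by omega), if_pos (by omega), if_neg (by omega),
                  if_neg (by omega), if_pos (by omega), if_pos (by omega)]
              rw [← h3]; simp
            · rw [if_neg (by omega), if_neg (by omega), if_neg (by omega),
                  if_neg (by omega), if_neg (by omega), if_pos (by omega)]
              rw [← h3]; simp
        · have hg : g (m : Int) = [] := by
            by_contra hne
            rcases h _ hne with h' | h' | h' <;> omega
          rw [hg]
          clear h
          split_ifs <;> simp_all <;> omega

theorem flat_three {β : Type} (n a : Int) (g : Int → List β)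
    (h : ∀ x, g x ≠ [] → x = a ∨ x = a + 1 ∨ x = a + 2) :
    (PySem.List.pyRange 0 n 1).flatMap g =
      (if 0 ≤ a ∧ a < n then g a else []) ++
      (if 0 ≤ a + 1 ∧ a + 1 < n then g (a + 1) else []) ++
      (if 0 ≤ a + 2 ∧ a + 2 < n then g (a + 2) else []) := by
  by_cases hn : n ≤ 0
  · rw [PySem.List.pyRange_one_eq_nil (by omega)]
    split_ifs <;> simp_all <;> omega
  · have : n = ((n.toNat : Nat) : Int) := by omega
    rw [this]
    exact flat_three_nat n.toNat a g h

-- an if-then-if collapses to a single conjunction guard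
theorem ifsplit {β : Type} (A B : Prop) [Decidable A] [Decidable B] (b : Bool) (x : List β) :
    (if A ∧ B then (if b then x else []) else []) = (if A ∧ B ∧ b = true then x else []) := by
  split_ifs <;> simp_all

-- filter over range(0, n) by a predicate true only at a, a+1, a+2
theorem filt_three (n a : Int) (p : Int → Bool)
    (h : ∀ x, p x = true → x = a ∨ x = a + 1 ∨ x = a + 2) :
    (PySem.List.pyRange 0 n 1).filter p =
      (if 0 ≤ a ∧ a < n ∧ p a then [a] else []) ++
      (if 0 ≤ a + 1 ∧ a + 1 < n ∧ p (a + 1) then [a + 1] else []) ++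
      (if 0 ≤ a + 2 ∧ a + 2 < n ∧ p (a + 2) then [a + 2] else []) := by
  have hf : ∀ (l : List Int), l.filter p = l.flatMap (fun x => if p x then [x] else []) := by
    intro l; induction l with
    | nil => simp
    | cons y ys ihy => simp only [List.filter_cons, List.flatMap_cons, ← ihy]; split <;> simp
  rw [hf, flat_three n a _ (by intro x hx; apply h; by_contra hb; simp [hb] at hx),
      ifsplit, ifsplit, ifsplit]

-- map over a filtered cons peels one guarded singleton
theorem mapfilt {α β : Type} (f : α → β) (p : α → Bool) (x : α) (xs : List α) :
    (List.filter p (x :: xs)).map f =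
      (if p x = true then [f x] else []) ++ (List.filter p xs).map f := by
  simp only [List.filter_cons]; split <;> simp

-- map over a guarded singleton
theorem mapif {α β : Type} (P : Prop) [Decidable P] (a : α) (f : α → β) :
    (if P then [a] else []).map f = (if P then [f a] else []) := by
  split <;> simp

-- a guard distributes over a concatenation
theorem ifdist2 {β : Type} (P : Prop) [Decidable P] (x y : List β) :
    (if P then x ++ y else []) = (if P then x else []) ++ (if P then y else []) := by
  split <;> simp

-- nested guards collapse to a conjunction
theorem ifnest {β : Type} (P Q : Prop) [Decidable P] [Decidable Q] (v : List β) :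
    (if P then (if Q then v else []) else []) = (if P ∧ Q then v else []) := by
  split_ifs <;> simp_all

-- ===== VERDICT =====
set_option maxHeartbeats 2000000 in
theorem get_neighbour_coords_py_spec : Claim_equal_get_neighbour_coords_py := by
  intro grid r c _
  unfold Spec_get_neighbour_coords_py
  simp only [get_neighbour_coords_py, get_neighbour_coords_py_alt]
  set rows : Int := (grid.length : Int) with hrows
  set cols : Int := if rows > 0 then ((grid.head?.getD []).length : Int) else 0 with hcols
  -- B side: inner fold -> filter, outer fold -> flatMap
  simp only [PySem.List.foldl_append_ite, PySem.List.foldl_append_eq_flatMap]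
  rw [flat_three rows (r - 1)
      (fun nr => ((PySem.List.pyRange 0 cols 1).filter
        (fun nc => decide (max (nr - r).natAbs (nc - c).natAbs = 1))).map (fun nc => (nr, nc)))
      (by
        intro x hx
        by_contra hb
        apply hx
        have hnil : ((PySem.List.pyRange 0 cols 1).filter
            (fun nc => decide (max (x - r).natAbs (nc - c).natAbs = 1))) = [] := by
          rw [List.filter_eq_nil_iff]
          intro nc _
          simp only [decide_eq_true_eq]
          omega
        simp only [hnil, List.map_nil])]

  rw [filt_three cols (c - 1) _ (by intro x hx; simp only [decide_eq_true_eq] at hx; omega),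
      filt_three cols (c - 1) _ (by intro x hx; simp only [decide_eq_true_eq] at hx; omega),
      filt_three cols (c - 1) _ (by intro x hx; simp only [decide_eq_true_eq] at hx; omega)]
  -- arithmetic normalisation facts
  have aA : (r - 1 - r).natAbs = 1 := by omega
  have aD : (r - r).natAbs = 0 := by omega
  have aE : (r + 1 - r).natAbs = 1 := by omega
  have bA : (c - 1 - c).natAbs = 1 := by omega
  have bD : (c - c).natAbs = 0 := by omega
  have bE : (c + 1 - c).natAbs = 1 := by omega
  have e1 : r - 1 + 1 = r := by ring
  have e2 : r - 1 + 2 = r + 1 := by ring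
  have e3 : c - 1 + 1 = c := by ring
  have e4 : c - 1 + 2 = c + 1 := by ring
  have f1 : r + (-1 : Int) = r - 1 := by ring
  have f2 : c + (-1 : Int) = c - 1 := by ring
  have f3 : r + (0 : Int) = r := by ring
  have f4 : c + (0 : Int) = c := by ring
  have m1 : (max 1 1 : Nat) = 1 := rfl
  have m2 : (max 1 0 : Nat) = 1 := rfl
  have m3 : (max 0 1 : Nat) = 1 := rfl
  have m4 : (max 0 0 : Nat) = 0 := rfl
  have n2 : ((0 : Nat) = 1) = False := by simp
  -- A side: filtered offset list into guarded singletons; B side: distribute map and guards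
  simp only [aA, aD, aE, bA, bD, bE, e1, e2, e3, e4, f1, f2, f3, f4,
    m1, m2, m3, m4, decide_eq_true_eq, n2, and_true, and_false, if_false,
    mapfilt, List.filter_nil, List.map_nil, List.map_append, mapif,
    ifdist2, ifnest, List.append_nil, List.nil_append, List.append_assoc]
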